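-- pv_equiv track=rewrite | github.com/GigaFlower/SJTU-Chinese-Word-Segmentation | kernel/test.py | convert_to_index_list
-- ===== SOURCE A (Python) =====
-- SPLIT = '|'
--
-- def convert_to_index_list(string: str) -> list:
--     """
--     This function convert a segmentation result to a list of start and end index of every word
--     Used to compare two segmentation result in detail in func diff()
--
--     Examples:
--     if SPLIT == '|'
--     >>> convert_to_index_list("ab|cd|e|fgh")
--     [(0,2),(2,4),(4,5),(5,8)]
--     """
--     ret = []
--     start = 0
--     l = string.split(SPLIT)
--     for i in l:
--         end = start + len(i)
--         ret.append((start, end))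
--         start = end
--     return ret
-- ===== SOURCE B (Python) =====
-- SPLIT = '|'
--
-- def convert_to_index_list(string: str) -> list:
--     # Character-level scan: record each separator's position, shifted left by the
--     # number of separators already seen, as a word boundary; never splits the string.
--     bounds = [0]
--     seen = 0
--     for pos, ch in enumerate(string):
--         if ch == SPLIT:
--             seen += 1
--             bounds.append(pos - seen + 1)
--     bounds.append(len(string) - seen)
--     return list(zip(bounds, bounds[1:]))
-- ===== Notes on version B (the rewrite author's own statement) =====
-- stated objective: alternative
-- what changed: Instead of splitting the string into words and accumulating a running start over word lengths, B scans the characters once, records each separator's position shifted left by the number of separators already seen as a word boundary, appends the final boundary, and zips adjacent boundaries.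
import Mathlib
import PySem

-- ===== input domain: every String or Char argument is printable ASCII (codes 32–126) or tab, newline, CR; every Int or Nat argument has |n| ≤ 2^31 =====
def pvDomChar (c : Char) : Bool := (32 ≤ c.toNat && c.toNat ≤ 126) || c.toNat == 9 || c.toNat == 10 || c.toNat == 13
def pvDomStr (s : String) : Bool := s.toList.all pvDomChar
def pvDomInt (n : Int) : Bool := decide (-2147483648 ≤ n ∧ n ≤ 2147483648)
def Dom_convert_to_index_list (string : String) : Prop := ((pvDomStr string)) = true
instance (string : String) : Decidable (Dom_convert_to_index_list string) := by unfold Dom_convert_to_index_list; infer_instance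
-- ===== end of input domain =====

-- B never splits the string: it scans characters once, records each separator's position
-- (shifted by the separators already seen) as a word boundary, and zips adjacent boundaries (alternative, same cost).
-- ===== PORT A =====
-- A: split on '|', then a loop maintaining (ret, start), one append per word
def convert_to_index_list (string : String) : List (Int × Int) :=
  let l := PySem.Chars.splitOn string.toList ['|']
  (l.foldl (fun (st : List (Int × Int) × Int) (i : List Char) =>
      let e : Int := st.2 + (i.length : Int)
      (st.1 ++ [(st.2, e)], e)) ([], 0)).1

-- ===== PORT B =====
def convert_to_index_list_alt (string : String) : List (Int × Int) :=
  let cs := string.toList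
  let st := (PySem.List.enumerate cs 0).foldl
    (fun (st : List Int × Int) (pc : Int × Char) =>
      if pc.2 = '|' then
        let seen := st.2 + 1
        (st.1 ++ [pc.1 - seen + 1], seen)
      else st) ([0], 0)
  let bounds := st.1 ++ [(cs.length : Int) - st.2]
  bounds.zip bounds.tail

-- ===== PRECONDITION & SPEC =====
def Spec_convert_to_index_list (string : String) (out : List (Int × Int)) : Prop := out = convert_to_index_list_alt string
instance (string : String) (out : List (Int × Int)) : Decidable (Spec_convert_to_index_list string out) := by unfold Spec_convert_to_index_list; infer_instance

-- ===== CLAIM =====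
def Claim_equal_convert_to_index_list : Prop := ∀ (string : String), Dom_convert_to_index_list string → Spec_convert_to_index_list string (convert_to_index_list string)

-- ===== LEMMAS AND PROOFS =====
-- canonical result: one pair per word length, starting at s
def pvPairs (s : Int) : List Int → List (Int × Int)
  | [] => []
  | L :: t => (s, s + L) :: pvPairs (s + L) t

-- running prefix sums starting after s
def pvScan (s : Int) : List Int → List Int
  | [] => []
  | L :: t => (s + L) :: pvScan (s + L) t

-- reference single-char split
def pvSplit1 : List Char → List (List Char)
  | [] => [[]]
  | c :: t => if c = '|' then [] :: pvSplit1 t else (pvSplit1 t).modifyHead (c :: ·)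

-- boundaries recorded by B's scan: word-index of each separator
def pvSepB (base : Int) : List Char → List Int
  | [] => []
  | c :: t => if c = '|' then base :: pvSepB base t else pvSepB (base + 1) t

theorem pvSplit1_ne_nil (cs : List Char) : pvSplit1 cs ≠ [] := by
  cases cs with
  | nil => simp [pvSplit1]
  | cons c t =>
      simp only [pvSplit1]
      split
      · simp
      · cases h : pvSplit1 t with
        | nil => exact absurd h (pvSplit1_ne_nil t)
        | cons w ws => simp [List.modifyHead]

theorem pvGo1 (l : List Char) (fuel : Nat) (cur : List Char) (acc : List (List Char))
    (h : l.length ≤ fuel) :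
    PySem.Chars.splitOn.go ['|'] fuel l cur acc
      = acc.reverse ++ (pvSplit1 l).modifyHead (cur.reverse ++ ·) := by
  induction l generalizing fuel cur acc with
  | nil =>
      rw [PySem.Chars.splitOn.go.eq_def]
      cases fuel <;> simp [pvSplit1, List.modifyHead]
  | cons c rest ih =>
      rw [PySem.Chars.splitOn.go.eq_def]
      cases fuel with
      | zero => simp at h
      | succ f =>
          simp only [List.length_cons, Nat.succ_le_succ_iff] at h
          by_cases hc : c = '|'
          · subst hc
            simp only [List.isPrefixOf, beq_self_eq_true, Bool.true_and, if_true,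
              List.length_cons, List.length_nil, List.drop_succ_cons, List.drop_zero]
            rw [ih f [] (cur.reverse :: acc) h]
            obtain ⟨w, ws, hw⟩ := List.exists_cons_of_ne_nil (pvSplit1_ne_nil rest)
            simp [pvSplit1, hw, List.modifyHead]
          · simp only [List.isPrefixOf, Bool.and_eq_true, beq_iff_eq]
            rw [if_neg (by simp; exact fun hb => hc hb.symm)]
            rw [ih f (c :: cur) acc h]
            simp only [pvSplit1, if_neg hc]
            obtain ⟨w, ws, hw⟩ := List.exists_cons_of_ne_nil (pvSplit1_ne_nil rest)
            simp [hw, List.modifyHead]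

theorem pvSplitOn_eq (cs : List Char) :
    PySem.Chars.splitOn cs ['|'] = pvSplit1 cs := by
  have := pvGo1 cs (cs.length + 1) [] [] (by omega)
  rw [PySem.Chars.splitOn, this]
  obtain ⟨w, ws, hw⟩ := List.exists_cons_of_ne_nil (pvSplit1_ne_nil cs)
  simp [hw, List.modifyHead]

theorem pvA_fold (ws : List (List Char)) (acc : List (Int × Int)) (s : Int) :
    (ws.foldl (fun (st : List (Int × Int) × Int) (i : List Char) =>
        (st.1 ++ [(st.2, st.2 + (i.length : Int))], st.2 + (i.length : Int))) (acc, s)).1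
      = acc ++ pvPairs s (ws.map (fun w => (w.length : Int))) := by
  induction ws generalizing acc s with
  | nil => simp [pvPairs]
  | cons w t ih => simp [List.foldl, pvPairs, ih]

theorem pvB_fold (cs : List Char) (off : Int) (acc : List Int) (seen : Int) :
    (PySem.List.enumerate cs off).foldl
      (fun (st : List Int × Int) (pc : Int × Char) =>
        if pc.2 = '|' then (st.1 ++ [pc.1 - (st.2 + 1) + 1], st.2 + 1) else st) (acc, seen)
      = (acc ++ pvSepB (off - seen) cs, seen + (cs.count '|' : Int)) := by
  induction cs generalizing off acc seen with
  | nil => simp [PySem.List.enumerate_nil, pvSepB]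
  | cons c t ih =>
      rw [PySem.List.enumerate_cons]
      simp only [List.foldl_cons]
      by_cases hc : c = '|'
      · subst hc
        rw [if_pos rfl, ih]
        simp only [pvSepB, List.count_cons_self, Prod.mk.injEq]
        refine ⟨?_, by push_cast; omega⟩
        have h1 : off + 1 - (seen + 1) = off - seen := by omega
        have h2 : off - (seen + 1) + 1 = off - seen := by omega
        rw [h1, h2, List.append_assoc]
        rfl
      · rw [if_neg hc, ih]
        simp only [pvSepB, if_neg hc, Prod.mk.injEq]
        refine ⟨?_, by rw [List.count_cons_of_ne hc]⟩
        have h1 : off + 1 - seen = off - seen + 1 := by omega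
        rw [h1]

theorem pvKey (cs : List Char) (s : Int) :
    pvSepB s cs ++ [s + ((cs.length : Int) - (cs.count '|' : Int))]
      = pvScan s ((pvSplit1 cs).map (fun w => (w.length : Int))) := by
  induction cs generalizing s with
  | nil => simp [pvSepB, pvSplit1, pvScan]
  | cons c t ih =>
      by_cases hc : c = '|'
      · subst hc
        have ht := ih s
        simp only [pvSepB, pvSplit1, List.count_cons_self, List.length_cons]
        push_cast at ht ⊢
        rw [show s + ((t.length : Int) + 1 - ((t.count '|' : Int) + 1))
              = s + ((t.length : Int) - (t.count '|' : Int)) from by omega]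
        rw [List.cons_append, ht]
        simp [pvScan]
      · obtain ⟨w, ws, hw⟩ := List.exists_cons_of_ne_nil (pvSplit1_ne_nil t)
        simp only [pvSepB, if_neg hc, pvSplit1, hw, List.modifyHead,
          List.map_cons, pvScan, List.length_cons, List.count_cons_of_ne hc]
        have ht := ih (s + 1)
        rw [hw] at ht
        simp only [List.map_cons, pvScan] at ht
        push_cast at ht ⊢
        rw [show s + ((w.length : Int) + 1) = s + 1 + (w.length : Int) from by omega]
        rw [show s + ((t.length : Int) + 1 - (t.count '|' : Int))
              = s + 1 + ((t.length : Int) - (t.count '|' : Int)) from by omega]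
        exact ht

theorem pvZip_pairs (ls : List Int) (s : Int) :
    (s :: pvScan s ls).zip (pvScan s ls) = pvPairs s ls := by
  induction ls generalizing s with
  | nil => simp [pvScan, pvPairs]
  | cons L t ih =>
      simp only [pvScan, pvPairs, List.zip, List.zipWith]
      exact congrArg _ (ih (s + L))

-- ===== VERDICT =====
theorem convert_to_index_list_spec : Claim_equal_convert_to_index_list := by
  intro string _
  unfold Spec_convert_to_index_list convert_to_index_list convert_to_index_list_alt
  simp only []
  rw [pvA_fold, pvB_fold string.toList 0 [0] 0, pvSplitOn_eq]
  have h0 : (0 : Int) - 0 = 0 := by omega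
  rw [h0]
  have hb : ([0] ++ pvSepB 0 string.toList)
        ++ [(string.toList.length : Int) - (0 + (string.toList.count '|' : Int))]
      = (0 : Int) :: pvScan 0 ((pvSplit1 string.toList).map (fun w => (w.length : Int))) := by
    rw [← pvKey string.toList 0]
    simp
  rw [hb]
  rw [List.tail_cons, pvZip_pairs]
  simp
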